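-- pv_equiv track=rewrite | github.com/kkr010128/codebert | problem207/problem207_55.py | hantei
-- ===== SOURCE A (Python) =====
-- def hantei(l):
--   for i in range(3):
--     if all([l[i][j]==0 for j in range(3)]):
--       return 'Yes'
--
--     elif all([l[j][i]==0 for j in range(3)]):
--       return 'Yes'
--
--     elif l[0][0]==0 and l[1][1]==0 and l[2][2]==0:
--       return 'Yes'
--
--     elif l[0][2]==0 and l[1][1]==0 and l[2][0]==0:
--       return 'Yes'
--
--     else:
--       continue
--
--   return 'No'
-- ===== SOURCE B (Python) =====
-- def hantei(l):
--     rc = [0, 0, 0]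
--     cc = [0, 0, 0]
--     d1 = 0
--     d2 = 0
--     for i in range(3):
--         for j in range(3):
--             if l[i][j] == 0:
--                 rc[i] += 1
--                 cc[j] += 1
--                 if i == j:
--                     d1 += 1
--                 if i + j == 2:
--                     d2 += 1
--     if 3 in rc or 3 in cc or d1 == 3 or d2 == 3:
--         return 'Yes'
--     return 'No'
-- ===== Notes on version B (the rewrite author's own statement) =====
-- stated objective: alternative
-- what changed: B makes a single counting pass over the nine cells, accumulating zero-counters per row, per column and per diagonal, then answers 'Yes' iff some counter reached 3, replacing A's per-line all() scans with elif/continue/early returns.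
-- outside the precondition, e.g. on hantei([[0, 0, 0]]): A returns 'Yes', B raises IndexError
import Mathlib
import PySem

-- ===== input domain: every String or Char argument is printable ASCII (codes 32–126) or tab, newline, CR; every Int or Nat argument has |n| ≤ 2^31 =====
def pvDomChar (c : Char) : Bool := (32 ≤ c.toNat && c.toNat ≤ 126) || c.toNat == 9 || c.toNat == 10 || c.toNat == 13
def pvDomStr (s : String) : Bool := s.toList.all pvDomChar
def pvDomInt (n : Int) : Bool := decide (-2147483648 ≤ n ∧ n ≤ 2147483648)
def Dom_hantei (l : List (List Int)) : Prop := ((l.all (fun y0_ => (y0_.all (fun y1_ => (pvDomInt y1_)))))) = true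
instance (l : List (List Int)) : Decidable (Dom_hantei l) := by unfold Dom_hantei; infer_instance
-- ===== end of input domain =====

-- B replaces A's per-line scans by one counting pass over the nine cells with row/column/diagonal zero-counters; objective: alternative (same cost).


-- ===== PORT A =====
-- l[i][j], exact under Pre_ (indices in range there; the default is never reached under Pre_)
def pvCell (l : List (List Int)) (i j : Int) : Int :=
  PySem.List.pyGetD (PySem.List.pyGetD l i []) j 0

def hanteiLoop (l : List (List Int)) : List Int → String
  | [] => "No"
  | i :: rest =>
    if (PySem.List.pyRange 0 3 1).all (fun j => pvCell l i j == 0) then "Yes"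
    else if (PySem.List.pyRange 0 3 1).all (fun j => pvCell l j i == 0) then "Yes"
    else if pvCell l 0 0 == 0 && pvCell l 1 1 == 0 && pvCell l 2 2 == 0 then "Yes"
    else if pvCell l 0 2 == 0 && pvCell l 1 1 == 0 && pvCell l 2 0 == 0 then "Yes"
    else hanteiLoop l rest

def hantei (l : List (List Int)) : String :=
  hanteiLoop l (PySem.List.pyRange 0 3 1)

-- ===== PORT B =====
-- xs[k] += 1 for an index k with 0 ≤ k < len xs (exact there; only such k occur in the port)
def pvBump (xs : List Int) (k : Int) : List Int :=
  xs.set k.toNat (xs.getD k.toNat 0 + 1)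

def hantei_alt (l : List (List Int)) : String :=
  let st := (PySem.List.pyRange 0 3 1).foldl (fun st i =>
    (PySem.List.pyRange 0 3 1).foldl (fun st j =>
      if pvCell l i j == 0 then
        (pvBump st.1 i, pvBump st.2.1 j,
         (if i == j then st.2.2.1 + 1 else st.2.2.1),
         (if i + j == 2 then st.2.2.2 + 1 else st.2.2.2))
      else st) st)
    (([0, 0, 0] : List Int), ([0, 0, 0] : List Int), (0 : Int), (0 : Int))
  if st.1.contains 3 || st.2.1.contains 3 || st.2.2.1 == 3 || st.2.2.2 == 3 then "Yes" else "No"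

-- ===== PRECONDITION & SPEC =====
-- Pre_ excludes grids that are not (at least) 3×3: there both Pythons can raise IndexError, and on
-- some such grids (e.g. a single all-zero row) A returns early before touching the missing cells while
-- B, which reads all nine cells, raises — no single value is specifiable on those inputs.
def Pre_hantei (l : List (List Int)) : Prop :=
  3 ≤ l.length ∧ ∀ r ∈ l.take 3, 3 ≤ r.length
instance (l : List (List Int)) : Decidable (Pre_hantei l) := by unfold Pre_hantei; infer_instance

def pvWitness_hantei : List (List Int) := [[1, 2, 3], [4, 5, 6], [7, 8, 9]]

def Spec_hantei (l : List (List Int)) (out : String) : Prop := out = hantei_alt l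
instance (l : List (List Int)) (out : String) : Decidable (Spec_hantei l out) := by unfold Spec_hantei; infer_instance

-- ===== CLAIM =====
def Claim_equal_hantei : Prop := ∀ (l : List (List Int)), Dom_hantei l → Pre_hantei l → Spec_hantei l (hantei l)

-- ===== LEMMAS AND PROOFS =====
theorem pvRange3 : PySem.List.pyRange 0 3 1 = [0, 1, 2] := by decide

-- Bool-parameterised mirrors of the two ports (b_ij stands for l[i][j] == 0); each is
-- definitionally equal to its port once the nine comparisons are abstracted.
def pvA (b00 b01 b02 b10 b11 b12 b20 b21 b22 : Bool) : String :=
  if b00 && (b01 && (b02 && true)) then "Yes"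
  else if b00 && (b10 && (b20 && true)) then "Yes"
  else if b00 && b11 && b22 then "Yes"
  else if b02 && b11 && b20 then "Yes"
  else if b10 && (b11 && (b12 && true)) then "Yes"
  else if b01 && (b11 && (b21 && true)) then "Yes"
  else if b00 && b11 && b22 then "Yes"
  else if b02 && b11 && b20 then "Yes"
  else if b20 && (b21 && (b22 && true)) then "Yes"
  else if b02 && (b12 && (b22 && true)) then "Yes"
  else if b00 && b11 && b22 then "Yes"
  else if b02 && b11 && b20 then "Yes"
  else "No"

def pvStep (i j : Int) (b : Bool) (st : List Int × List Int × Int × Int) :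
    List Int × List Int × Int × Int :=
  if b then
    (pvBump st.1 i, pvBump st.2.1 j,
     (if i == j then st.2.2.1 + 1 else st.2.2.1),
     (if i + j == 2 then st.2.2.2 + 1 else st.2.2.2))
  else st

def pvB (b00 b01 b02 b10 b11 b12 b20 b21 b22 : Bool) : String :=
  let st := pvStep 2 2 b22 (pvStep 2 1 b21 (pvStep 2 0 b20 (pvStep 1 2 b12 (pvStep 1 1 b11
    (pvStep 1 0 b10 (pvStep 0 2 b02 (pvStep 0 1 b01 (pvStep 0 0 b00
      (([0, 0, 0] : List Int), ([0, 0, 0] : List Int), (0 : Int), (0 : Int))))))))))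
  if st.1.contains 3 || st.2.1.contains 3 || st.2.2.1 == 3 || st.2.2.2 == 3 then "Yes" else "No"

theorem pvAB (b00 b01 b02 b10 b11 b12 b20 b21 b22 : Bool) :
    pvA b00 b01 b02 b10 b11 b12 b20 b21 b22 = pvB b00 b01 b02 b10 b11 b12 b20 b21 b22 := by
  revert b00 b01 b02 b10 b11 b12 b20 b21 b22; decide

theorem step_eq (l : List (List Int)) (i j : Int) (st : List Int × List Int × Int × Int) :
    (if pvCell l i j == 0 then
      (pvBump st.1 i, pvBump st.2.1 j,
       (if i == j then st.2.2.1 + 1 else st.2.2.1),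
       (if i + j == 2 then st.2.2.2 + 1 else st.2.2.2))
    else st) = pvStep i j (pvCell l i j == 0) st := rfl

theorem bridgeB (l : List (List Int)) :
    hantei_alt l = pvB (pvCell l 0 0 == 0) (pvCell l 0 1 == 0) (pvCell l 0 2 == 0)
      (pvCell l 1 0 == 0) (pvCell l 1 1 == 0) (pvCell l 1 2 == 0)
      (pvCell l 2 0 == 0) (pvCell l 2 1 == 0) (pvCell l 2 2 == 0) := by
  simp only [hantei_alt, pvB, pvRange3, List.foldl_cons, List.foldl_nil, step_eq]

theorem bridgeA (l : List (List Int)) :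
    hantei l = pvA (pvCell l 0 0 == 0) (pvCell l 0 1 == 0) (pvCell l 0 2 == 0)
      (pvCell l 1 0 == 0) (pvCell l 1 1 == 0) (pvCell l 1 2 == 0)
      (pvCell l 2 0 == 0) (pvCell l 2 1 == 0) (pvCell l 2 2 == 0) := by
  simp only [hantei, hanteiLoop, pvA, pvRange3, List.all_cons, List.all_nil]

-- ===== VERDICT =====
theorem hantei_spec : Claim_equal_hantei := by
  intro l _ _
  show hantei l = hantei_alt l
  rw [bridgeA, bridgeB]
  exact pvAB _ _ _ _ _ _ _ _ _
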